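-- pv_equiv track=rewrite | github.com/SuperSid99/the_blockchain | image.py | genarate_key
-- ===== SOURCE A (Python) =====
-- def genarate_key(key):
--
--     dic = {}
--     count = 0
--     c1 = 0
--     arr = []
--     for _ in str(key):
--         if int(_) not in arr:
--             dic[str(count)] = _
--             arr.append(int(_))
--             count += 1
--         else:
--             continue
--
--     for _ in range(10 - len(dic)):
--         nono = True
--         while nono:
--
--             if 9 - c1 not in arr:
--                 dic[str(count)] = str(9 - c1)
--                 arr.append(9 - c1)
--                 count += 1
--                 c1 += 1
--                 nono = False
--             else:
--                 c1 += 1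
--     return(dic)
-- ===== SOURCE B (Python) =====
-- def genarate_key(key):
--     s = str(key)
--     first = {}
--     for i, ch in enumerate(s):
--         d = int(ch)  # raises ValueError exactly where A's int(_) does (e.g. the '-' of a negative key)
--         if d not in first:
--             first[d] = i
--     # rank: seen digits sort by first-occurrence index (< len(s)); unseen digits get
--     # rank len(s)+9-d, i.e. after all seen ones and in descending digit order.
--     order = sorted(range(10), key=lambda d: first.get(d, len(s) + 9 - d))
--     return {str(i): str(d) for i, d in enumerate(order)}
-- ===== Notes on version B (the rewrite author's own statement) =====
-- stated objective: alternative
-- what changed: A builds the dict in two imperative phases (first-occurrence append loop, then a while-scan with a persistent cursor c1 hunting each unused digit downwards); B instead records each digit's first-occurrence index in one pass and obtains the whole ordering as a single key-sort of range(10) by rank (first index if seen, otherwise a past-the-end rank that orders unseen digits descending), then emits the dict in one enumerate pass.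
import Mathlib
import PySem

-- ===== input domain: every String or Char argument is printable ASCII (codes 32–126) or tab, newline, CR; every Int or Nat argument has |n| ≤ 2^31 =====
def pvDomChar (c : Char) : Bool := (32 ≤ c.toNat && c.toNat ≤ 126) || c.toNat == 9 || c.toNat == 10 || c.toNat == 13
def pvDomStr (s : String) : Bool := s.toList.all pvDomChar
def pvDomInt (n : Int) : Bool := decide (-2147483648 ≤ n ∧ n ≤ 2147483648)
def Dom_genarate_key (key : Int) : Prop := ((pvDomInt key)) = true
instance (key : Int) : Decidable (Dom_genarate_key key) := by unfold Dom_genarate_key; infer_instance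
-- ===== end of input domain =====

-- B replaces A's two imperative phases (dedup-append loop, then a while-scan with cursor c1)
-- by a first-occurrence-index dict and ONE key-sort of range(10) by rank; objective: alternative.

-- ===== PORT A =====
-- int(ch) for a single character ch; total via getD 0 — Pre_ excludes key < 0, the only inputs
-- where Python's int(_) raises here (on the '-' character), so the default is never reached.
def pyIntChar (c : Char) : Int := (PySem.Int.ofStr? (String.ofList [c])).getD 0

-- first for-loop of A: state (dic, count, arr)
def gkStep (st : PySem.Dict String String × Int × List Int) (c : Char) :
    PySem.Dict String String × Int × List Int :=
  if pyIntChar c ∉ st.2.2 then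
    (st.1.insert (PySem.Int.toStr st.2.1) (String.ofList [c]), st.2.1 + 1, st.2.2 ++ [pyIntChar c])
  else st

-- the inner 'while nono' loop of A: advance c1 until 9 - c1 is not in arr, return the new c1.
-- fuel 20 only makes the recursion structural; under Pre_ the scan always stops within 20 steps.
def gkFind (arr : List Int) : Int → Nat → Int
  | c1, 0 => c1
  | c1, fuel + 1 => if (9 - c1) ∈ arr then gkFind arr (c1 + 1) fuel else c1

-- the second for-loop of A, n = 10 - len(dic) iterations over state (dic, count, arr, c1)
def gkFill : Nat → PySem.Dict String String × Int × List Int × Int → PySem.Dict String String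
  | 0, st => st.1
  | n + 1, (dic, count, arr, c1) =>
    let c1' := gkFind arr c1 20
    gkFill n (dic.insert (PySem.Int.toStr count) (PySem.Int.toStr (9 - c1')),
              count + 1, arr ++ [9 - c1'], c1' + 1)

def genarate_key (key : Int) : List (String × String) :=
  let st := (PySem.Int.toChars key).foldl gkStep (PySem.Dict.empty, 0, [])
  (gkFill (10 - (st.1.size : Int)).toNat (st.1, st.2.1, st.2.2, 0)).items

-- ===== PORT B =====
-- first loop of B: first-occurrence index of each digit, over enumerate(str(key))
def gkFStep (f : PySem.Dict Int Int) (p : Int × Char) : PySem.Dict Int Int :=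
  if f.contains (pyIntChar p.2) then f else f.insert (pyIntChar p.2) p.1

def genarate_key_alt (key : Int) : List (String × String) :=
  let s := PySem.Int.toChars key
  let first := (PySem.List.enumerate s 0).foldl gkFStep PySem.Dict.empty
  let order := PySem.List.sorted (PySem.List.pyRange 0 10 1)
    (fun d => first.getD d ((s.length : Int) + 9 - d))
  (PySem.List.enumerate order 0).map (fun p => (PySem.Int.toStr p.1, PySem.Int.toStr p.2))

-- ===== PRECONDITION & SPEC =====
-- Python's genarate_key raises ValueError on int('-') for every negative key; Pre_ excludes those.
def Pre_genarate_key (key : Int) : Prop := 0 ≤ key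
instance (key : Int) : Decidable (Pre_genarate_key key) := by unfold Pre_genarate_key; infer_instance
def pvWitness_genarate_key : Int := (102)

def Spec_genarate_key (key : Int) (out : List (String × String)) : Prop := out = genarate_key_alt key
instance (key : Int) (out : List (String × String)) : Decidable (Spec_genarate_key key out) := by unfold Spec_genarate_key; infer_instance

-- ===== CLAIM (what is proved, stated in full; the proofs are below) =====
def Claim_equal_genarate_key : Prop := ∀ (key : Int), Dom_genarate_key key → Pre_genarate_key key → Spec_genarate_key key (genarate_key key)

-- ===== LEMMAS AND PROOFS =====

def digitChars : List Char := ['0','1','2','3','4','5','6','7','8','9']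
def digitVals : List Int := [0,1,2,3,4,5,6,7,8,9]
def pairF (p : Int × Int) : String × String := (PySem.Int.toStr p.1, PySem.Int.toStr p.2)

-- the values newly appended to arr/seen by a first-occurrence pass over cs, given prior arr
def dnew : List Char → List Int → List Int
  | [], _ => []
  | c :: cs, arr =>
    if pyIntChar c ∉ arr then pyIntChar c :: dnew cs (arr ++ [pyIntChar c]) else dnew cs arr

-- the (digit, first-index) pairs appended to B's dict by the pass over cs starting at index n
def fnew : List Char → List Int → Int → List (Int × Int)
  | [], _, _ => []
  | c :: cs, arr, n =>
    if pyIntChar c ∉ arr then (pyIntChar c, n) :: fnew cs (arr ++ [pyIntChar c]) (n + 1)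
    else fnew cs arr (n + 1)

lemma digit_props (c : Char) (h : c ∈ digitChars) :
    PySem.Int.toStr (pyIntChar c) = String.ofList [c] ∧ pyIntChar c ∈ digitVals := by
  fin_cases h <;> exact ⟨by decide, by decide⟩

lemma toDigitsCore_digits : ∀ (f n : Nat) (ds : List Char), (∀ c ∈ ds, c ∈ digitChars) →
    ∀ c ∈ Nat.toDigitsCore 10 f n ds, c ∈ digitChars := by
  intro f
  induction f with
  | zero => intro n ds hds c hc; simp [Nat.toDigitsCore] at hc; exact hds c hc
  | succ f ih =>
    intro n ds hds c hc
    have hd : (n % 10).digitChar ∈ digitChars := by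
      have h10 : n % 10 < 10 := Nat.mod_lt n (by norm_num)
      set m := n % 10 with hm
      interval_cases m <;> decide
    have hds' : ∀ x ∈ ((n % 10).digitChar :: ds), x ∈ digitChars := by
      intro x hx
      rcases List.mem_cons.mp hx with h | h
      · exact h ▸ hd
      · exact hds x h
    rw [Nat.toDigitsCore] at hc
    by_cases hz : n / 10 = 0
    · rw [if_pos hz] at hc
      exact hds' c hc
    · rw [if_neg hz] at hc
      exact ih (n / 10) _ hds' c hc

lemma toChars_digits (key : Int) (h : 0 ≤ key) : ∀ c ∈ PySem.Int.toChars key, c ∈ digitChars := by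
  intro c hc
  rw [PySem.Int.toChars, if_neg (by omega)] at hc
  exact toDigitsCore_digits _ _ _ (by simp) c hc

lemma toStr_ne (i j : Int) (h0 : 0 ≤ i) (hij : i < j) (h9 : j ≤ 9) :
    PySem.Int.toStr i ≠ PySem.Int.toStr j := by
  have h8 : i ≤ 8 := by omega
  have h1 : 1 ≤ j := by omega
  interval_cases i <;> interval_cases j <;> decide

lemma phase1_spec : ∀ (cs : List Char), (∀ c ∈ cs, c ∈ digitChars) →
    ∀ (dic : PySem.Dict String String) (arr : List Int),
    arr.Nodup → (∀ v ∈ arr, v ∈ digitVals) →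
    (∀ i : Int, (arr.length : Int) ≤ i → i ≤ 9 → PySem.Int.toStr i ∉ dic.keys) →
    (cs.foldl gkStep (dic, (arr.length : Int), arr)).2.2 = arr ++ dnew cs arr ∧
    (cs.foldl gkStep (dic, (arr.length : Int), arr)).2.1 = ((arr ++ dnew cs arr).length : Int) ∧
    (cs.foldl gkStep (dic, (arr.length : Int), arr)).1.items =
      dic.items ++ (PySem.List.enumerate (dnew cs arr) (arr.length : Int)).map pairF ∧
    (arr ++ dnew cs arr).Nodup ∧ (∀ v ∈ arr ++ dnew cs arr, v ∈ digitVals) ∧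
    (∀ i : Int, ((arr ++ dnew cs arr).length : Int) ≤ i → i ≤ 9 →
      PySem.Int.toStr i ∉ (cs.foldl gkStep (dic, (arr.length : Int), arr)).1.keys) := by
  intro cs
  induction cs with
  | nil =>
    intro _ dic arr hnd hsub hfresh
    simp only [List.foldl_nil, dnew]
    refine ⟨by simp, by simp, by simp [PySem.List.enumerate_nil], by simpa using hnd, by simpa using hsub, ?_⟩
    intro i hi h9
    exact hfresh i (by simpa using hi) h9
  | cons c cs ih =>
    intro hdig dic arr hnd hsub hfresh
    have hc : c ∈ digitChars := hdig c (by simp)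
    have hcs : ∀ x ∈ cs, x ∈ digitChars := fun x hx => hdig x (by simp [hx])
    obtain ⟨htoStr, hval⟩ := digit_props c hc
    have hlen10 : arr.length ≤ 10 := by
      have : arr.toFinset.card = arr.length := List.toFinset_card_of_nodup hnd
      have hsub' : arr.toFinset ⊆ digitVals.toFinset := by
        intro x hx; simp only [List.mem_toFinset] at *; exact hsub x hx
      have := Finset.card_le_card hsub'
      simp [digitVals] at this; omega
    by_cases h : pyIntChar c ∉ arr
    · -- new value
      have harrlen : arr.length < 10 := by
        by_contra hge
        have heq : arr.length = 10 := by omega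
        have : arr.toFinset = digitVals.toFinset := by
          apply Finset.eq_of_subset_of_card_le
          · intro x hx; simp only [List.mem_toFinset] at *; exact hsub x hx
          · have : arr.toFinset.card = arr.length := List.toFinset_card_of_nodup hnd
            simp [digitVals]; omega
        have : pyIntChar c ∈ arr := by
          have : pyIntChar c ∈ arr.toFinset := by rw [this]; simpa using hval
          simpa using this
        exact h this
      have hstep : gkStep (dic, (arr.length : Int), arr) c =
          (dic.insert (PySem.Int.toStr (arr.length : Int)) (String.ofList [c]),
           (arr.length : Int) + 1, arr ++ [pyIntChar c]) := by
        simp [gkStep, h]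
      have hfreshc : PySem.Int.toStr (arr.length : Int) ∉ dic.keys :=
        hfresh _ (le_refl _) (by omega)
      have hnotc : dic.contains (PySem.Int.toStr (arr.length : Int)) = false := by
        by_contra hb
        have : dic.contains (PySem.Int.toStr (arr.length : Int)) = true := by
          revert hb; cases dic.contains (PySem.Int.toStr (arr.length : Int)) <;> simp
        exact hfreshc ((PySem.Dict.contains_iff_mem_keys dic _).mp this)
      have ihx := ih hcs (dic.insert (PySem.Int.toStr (arr.length : Int)) (String.ofList [c]))
        (arr ++ [pyIntChar c])
        (by rw [List.nodup_append]
            refine ⟨hnd, List.nodup_singleton _, ?_⟩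
            intro a ha b hb
            rcases List.mem_singleton.mp hb with rfl
            exact fun e => h (e ▸ ha))
        (by intro v hv
            rcases List.mem_append.mp hv with hv | hv
            · exact hsub v hv
            · simp at hv; exact hv ▸ hval)
        (by intro i hi h9
            have hlen : ((arr ++ [pyIntChar c]).length : Int) = (arr.length : Int) + 1 := by simp
            rw [hlen] at hi
            intro hmem
            rcases (PySem.Dict.mem_keys_insert _ _ _ _).mp hmem with heq | hmem'
            · exact toStr_ne (arr.length : Int) i (by positivity) (by omega) h9 heq.symm
            · exact hfresh i (by omega) h9 hmem')
      have hdn : dnew (c :: cs) arr = pyIntChar c :: dnew cs (arr ++ [pyIntChar c]) := by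
        simp [dnew, h]
      have hitems : (dic.insert (PySem.Int.toStr (arr.length : Int)) (String.ofList [c])).items =
          dic.items ++ [(PySem.Int.toStr (arr.length : Int), String.ofList [c])] :=
        PySem.Dict.items_insert_of_not_contains dic _ hnotc
      simp only [List.foldl_cons, hstep, hdn] at *
      have hlc : ((arr ++ [pyIntChar c]).length : Int) = (arr.length : Int) + 1 := by simp
      rw [hlc] at ihx
      obtain ⟨i1, i2, i3, i4, i5, i6⟩ := ihx
      refine ⟨by simpa using i1, by simpa using i2, ?_, by simpa using i4, by simpa using i5, ?_⟩
      · rw [i3, hitems, PySem.List.enumerate_cons]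
        simp [pairF, htoStr]
      · intro i hi h9
        exact i6 i (by simpa using hi) h9
    · -- value already present
      rw [not_not] at h
      have hstep : gkStep (dic, (arr.length : Int), arr) c = (dic, (arr.length : Int), arr) := by
        simp [gkStep, h]
      have hdn : dnew (c :: cs) arr = dnew cs arr := by simp [dnew, h]
      simp only [List.foldl_cons, hstep, hdn]
      exact ih hcs dic arr hnd hsub hfresh

lemma gkFind_spec : ∀ (fuel : Nat) (c1 e : Int) (arr : List Int), c1 ≤ e → (9 - e) ∉ arr →
    e - c1 < (fuel : Int) →
    c1 ≤ gkFind arr c1 fuel ∧ gkFind arr c1 fuel ≤ e ∧ (9 - gkFind arr c1 fuel) ∉ arr ∧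
      ∀ i : Int, c1 ≤ i → i < gkFind arr c1 fuel → (9 - i) ∈ arr := by
  intro fuel
  induction fuel with
  | zero => intro c1 e arr h1 h2 h3; omega
  | succ fuel ih =>
    intro c1 e arr h1 h2 h3
    by_cases hm : (9 - c1) ∈ arr
    · have hne : c1 ≠ e := fun he => h2 (he ▸ hm)
      have := ih (c1 + 1) e arr (by omega) h2 (by omega)
      rw [gkFind, if_pos hm]
      refine ⟨by omega, this.2.1, this.2.2.1, ?_⟩
      intro i hi hlt
      by_cases hic : i = c1
      · exact hic ▸ hm
      · exact this.2.2.2 i (by omega) hlt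
    · rw [gkFind, if_neg hm]
      exact ⟨le_refl _, by omega, hm, by omega⟩

lemma filter_desc_cons : ∀ (k : Nat) (m : Int), m < (k : Int) → ∀ (arr : List Int) (d : Int) (rest : List Int),
    (PySem.List.pyRange m (-1) (-1)).filter (fun x => decide (x ∉ arr)) = d :: rest →
    0 ≤ d ∧ d ≤ m ∧ d ∉ arr ∧ (∀ x : Int, d < x → x ≤ m → x ∈ arr) ∧
      rest = (PySem.List.pyRange (d - 1) (-1) (-1)).filter (fun x => decide (x ∉ arr)) := by
  intro k
  induction k with
  | zero =>
    intro m hm arr d rest hf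
    rw [PySem.List.pyRange_neg_one_eq_nil (by omega)] at hf
    simp at hf
  | succ k ih =>
    intro m hm arr d rest hf
    by_cases hneg : m ≤ -1
    · rw [PySem.List.pyRange_neg_one_eq_nil (by omega)] at hf
      simp at hf
    · rw [PySem.List.pyRange_neg_one_cons (by omega), List.filter_cons] at hf
      by_cases hma : m ∉ arr
      · rw [if_pos (by simpa using hma)] at hf
        obtain ⟨rfl, rfl⟩ : m = d ∧ (PySem.List.pyRange (m - 1) (-1) (-1)).filter (fun x => decide (x ∉ arr)) = rest := by
          constructor
          · exact (List.cons.injEq _ _ _ _ ▸ hf).1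
          · exact (List.cons.injEq _ _ _ _ ▸ hf).2
        exact ⟨by omega, le_refl _, hma, by omega, rfl⟩
      · rw [not_not] at hma
        rw [if_neg (by simpa using hma)] at hf
        have := ih (m - 1) (by omega) arr d rest hf
        refine ⟨this.1, by omega, this.2.2.1, ?_, this.2.2.2.2⟩
        intro x hx1 hx2
        by_cases hxm : x = m
        · exact hxm ▸ hma
        · exact this.2.2.2.1 x hx1 (by omega)

lemma fill_spec : ∀ (n : Nat) (dic : PySem.Dict String String) (count c1 : Int) (arr : List Int),
    0 ≤ c1 → 0 ≤ count → count + (n : Int) ≤ 10 →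
    (∀ x : Int, 9 - c1 < x → x ≤ 9 → x ∈ arr) →
    (∀ i : Int, count ≤ i → i ≤ 9 → PySem.Int.toStr i ∉ dic.keys) →
    ((PySem.List.pyRange (9 - c1) (-1) (-1)).filter (fun x => decide (x ∉ arr))).length = n →
    (gkFill n (dic, count, arr, c1)).items =
      dic.items ++ (PySem.List.enumerate
        ((PySem.List.pyRange (9 - c1) (-1) (-1)).filter (fun x => decide (x ∉ arr))) count).map pairF := by
  intro n
  induction n with
  | zero =>
    intro dic count c1 arr _ _ _ _ _ hn
    rw [List.length_eq_zero_iff] at hn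
    rw [hn]
    simp [gkFill, PySem.List.enumerate_nil]
  | succ n ih =>
    intro dic count c1 arr hc1 hcnt hten hup hfresh hn
    cases hM : (PySem.List.pyRange (9 - c1) (-1) (-1)).filter (fun x => decide (x ∉ arr)) with
    | nil => rw [hM] at hn; simp at hn
    | cons d rest =>
      obtain ⟨hd0, hdm, hdarr, hmax, hrest⟩ := filter_desc_cons 10 (9 - c1) (by omega) arr d rest hM
      have hfind := gkFind_spec 20 c1 (9 - d) arr (by omega) (by simpa using hdarr) (by omega)
      set r := gkFind arr c1 20 with hr
      have hrd : 9 - r = d := by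
        by_contra hne
        have hgt : d < 9 - r := by omega
        exact hfind.2.2.1 (hmax (9 - r) hgt (by omega))
      have hcnt9 : count ≤ 9 := by omega
      have hunf : gkFill (n + 1) (dic, count, arr, c1) =
          gkFill n (dic.insert (PySem.Int.toStr count) (PySem.Int.toStr (9 - r)),
            count + 1, arr ++ [9 - r], r + 1) := rfl
      have hfresh' : ∀ i : Int, count + 1 ≤ i → i ≤ 9 →
          PySem.Int.toStr i ∉ (dic.insert (PySem.Int.toStr count) (PySem.Int.toStr (9 - r))).keys := by
        intro i hi h9 hmem
        rcases (PySem.Dict.mem_keys_insert _ _ _ _).mp hmem with heq | hmem'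
        · exact toStr_ne count i hcnt (by omega) h9 heq.symm
        · exact hfresh i (by omega) h9 hmem'
      have hup' : ∀ x : Int, 9 - (r + 1) < x → x ≤ 9 → x ∈ arr ++ [9 - r] := by
        intro x hx1 hx2
        rw [List.mem_append]
        by_cases hxd : x = 9 - r
        · right; simp [hxd]
        · left
          by_cases hxc : x ≤ 9 - c1
          · exact hmax x (by omega) hxc
          · exact hup x (by omega) hx2
      have hfilt' : (PySem.List.pyRange (9 - (r + 1)) (-1) (-1)).filter
          (fun x => decide (x ∉ arr ++ [9 - r])) =
          (PySem.List.pyRange (d - 1) (-1) (-1)).filter (fun x => decide (x ∉ arr)) := by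
        have h91 : 9 - (r + 1) = d - 1 := by omega
        rw [h91]
        apply List.filter_congr
        intro x hx
        rcases PySem.List.mem_pyRange_neg_one.mp hx with ⟨_, hxle⟩
        simp only [List.mem_append, List.mem_singleton, decide_eq_decide]
        constructor
        · intro hno hor
          exact hno (Or.inl hor)
        · intro hno hor
          rcases hor with hor | hor
          · exact hno hor
          · omega
      have hlen' : ((PySem.List.pyRange (9 - (r + 1)) (-1) (-1)).filter
          (fun x => decide (x ∉ arr ++ [9 - r]))).length = n := by
        rw [hfilt', ← hrest]
        have : (d :: rest).length = n + 1 := by rw [← hM, hn]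
        simpa using this
      have hnotc : dic.contains (PySem.Int.toStr count) = false := by
        by_contra hb
        have hbt : dic.contains (PySem.Int.toStr count) = true := by
          revert hb; cases dic.contains (PySem.Int.toStr count) <;> simp
        exact hfresh count (le_refl _) hcnt9 ((PySem.Dict.contains_iff_mem_keys dic _).mp hbt)
      rw [hunf, ih _ _ _ _ (by omega) (by omega) (by omega) hup' hfresh' hlen',
        PySem.Dict.items_insert_of_not_contains dic _ hnotc, hfilt', ← hrest,
        PySem.List.enumerate_cons]
      simp [pairF, hrd]

lemma missing_length (seen : List Int) (hnd : seen.Nodup) (hsub : ∀ v ∈ seen, v ∈ digitVals) :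
    seen.length ≤ 10 ∧
    ((PySem.List.pyRange 9 (-1) (-1)).filter (fun x => decide (x ∉ seen))).length
      = 10 - seen.length := by
  have hL : PySem.List.pyRange 9 (-1) (-1) = [9,8,7,6,5,4,3,2,1,0] := by decide
  have hLnd : (PySem.List.pyRange 9 (-1) (-1)).Nodup := by rw [hL]; decide
  have hmem : ∀ x : Int, x ∈ digitVals ↔ x ∈ PySem.List.pyRange 9 (-1) (-1) := by
    intro x; rw [hL]; simp [digitVals]; omega
  have hperm : ((PySem.List.pyRange 9 (-1) (-1)).filter (fun x => decide (x ∈ seen))).Perm seen := by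
    apply (List.perm_ext_iff_of_nodup (List.Nodup.filter _ hLnd) hnd).mpr
    intro x
    simp only [List.mem_filter, decide_eq_true_eq]
    constructor
    · exact fun h => h.2
    · intro h
      exact ⟨(hmem x).mp (hsub x h), h⟩
  have hlf : ((PySem.List.pyRange 9 (-1) (-1)).filter (fun x => decide (x ∈ seen))).length = seen.length :=
    hperm.length_eq
  have htot := (List.length_eq_length_filter_add (l := PySem.List.pyRange 9 (-1) (-1))
    (fun x => decide (x ∈ seen))).symm
  have hLlen : (PySem.List.pyRange 9 (-1) (-1)).length = 10 := by rw [hL]; rfl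
  have hnegeq : ((PySem.List.pyRange 9 (-1) (-1)).filter (fun x => !decide (x ∈ seen))).length
      = ((PySem.List.pyRange 9 (-1) (-1)).filter (fun x => decide (x ∉ seen))).length := by
    congr 1
    apply List.filter_congr
    intro x _
    simp
  constructor
  · omega
  · omega

-- ===== B-side lemmas =====

lemma fnew_fst : ∀ (cs : List Char) (arr : List Int) (n : Int),
    (fnew cs arr n).map Prod.fst = dnew cs arr := by
  intro cs
  induction cs with
  | nil => intro arr n; simp [fnew, dnew]
  | cons c cs ih =>
    intro arr n
    by_cases h : pyIntChar c ∉ arr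
    · simp [fnew, dnew, h, ih]
    · simp [fnew, dnew, h, ih]

lemma fnew_snd_bounds : ∀ (cs : List Char) (arr : List Int) (n : Int),
    ∀ p ∈ fnew cs arr n, n ≤ p.2 ∧ p.2 < n + (cs.length : Int) := by
  intro cs
  induction cs with
  | nil => intro arr n p hp; simp [fnew] at hp
  | cons c cs ih =>
    intro arr n p hp
    by_cases h : pyIntChar c ∉ arr
    · rw [fnew, if_pos h] at hp
      rcases List.mem_cons.mp hp with rfl | hp'
      · refine ⟨le_refl _, ?_⟩
        simp only [List.length_cons]
        push_cast
        omega
      · have := ih (arr ++ [pyIntChar c]) (n + 1) p hp'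
        constructor
        · omega
        · simp only [List.length_cons]; push_cast; omega
    · rw [fnew, if_neg h] at hp
      have := ih arr (n + 1) p hp
      constructor
      · omega
      · simp only [List.length_cons]; push_cast; omega

lemma fnew_pairwise : ∀ (cs : List Char) (arr : List Int) (n : Int),
    (fnew cs arr n).Pairwise (fun p q => p.2 < q.2) := by
  intro cs
  induction cs with
  | nil => intro arr n; simp [fnew]
  | cons c cs ih =>
    intro arr n
    by_cases h : pyIntChar c ∉ arr
    · rw [fnew, if_pos h]
      refine List.Pairwise.cons ?_ (ih _ _)
      intro q hq
      have := fnew_snd_bounds cs (arr ++ [pyIntChar c]) (n + 1) q hq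
      simp; omega
    · rw [fnew, if_neg h]
      exact ih _ _

lemma first_items : ∀ (cs : List Char) (n : Int) (f : PySem.Dict Int Int),
    ((PySem.List.enumerate cs n).foldl gkFStep f).items = f.items ++ fnew cs f.keys n := by
  intro cs
  induction cs with
  | nil => intro n f; simp [PySem.List.enumerate_nil, fnew]
  | cons c cs ih =>
    intro n f
    rw [PySem.List.enumerate_cons, List.foldl_cons]
    by_cases h : pyIntChar c ∈ f.keys
    · have hct : f.contains (pyIntChar c) = true := (PySem.Dict.contains_iff_mem_keys f _).mpr h
      have hstep : gkFStep f (n, c) = f := by simp [gkFStep, hct]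
      rw [hstep, ih, fnew, if_neg (by simpa using h)]
    · have hcf : f.contains (pyIntChar c) = false := by
        by_contra hb
        have : f.contains (pyIntChar c) = true := by
          revert hb; cases f.contains (pyIntChar c) <;> simp
        exact h ((PySem.Dict.contains_iff_mem_keys f _).mp this)
      have hstep : gkFStep f (n, c) = f.insert (pyIntChar c) n := by simp [gkFStep, hcf]
      rw [hstep, ih, fnew, if_pos (by simpa using h),
        PySem.Dict.items_insert_of_not_contains f _ hcf,
        PySem.Dict.keys_insert_of_not_contains f _ hcf]
      simp

-- the first dict B builds over str(key): items are exactly fnew cs [] 0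
lemma first_dict_items (cs : List Char) :
    ((PySem.List.enumerate cs 0).foldl gkFStep PySem.Dict.empty).items = fnew cs [] 0 := by
  have := first_items cs 0 PySem.Dict.empty
  simpa [PySem.Dict.keys_empty] using this

-- B's sorted order over range(10) is exactly seen ++ remaining
lemma order_eq (cs : List Char) (hnd : (dnew cs []).Nodup) (hsub : ∀ v ∈ dnew cs [], v ∈ digitVals) :
    PySem.List.sorted (PySem.List.pyRange 0 10 1)
      (fun d => ((PySem.List.enumerate cs 0).foldl gkFStep PySem.Dict.empty).getD d
        ((cs.length : Int) + 9 - d)) =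
    dnew cs [] ++ (PySem.List.pyRange 9 (-1) (-1)).filter (fun x => decide (x ∉ dnew cs [])) := by
  set seen := dnew cs [] with hseen
  set L : Int := (cs.length : Int) with hLdef
  set F := (PySem.List.enumerate cs 0).foldl gkFStep PySem.Dict.empty with hF
  set rem := (PySem.List.pyRange 9 (-1) (-1)).filter (fun x => decide (x ∉ seen)) with hrem
  have hitems : F.items = fnew cs [] 0 := first_dict_items cs
  have hkeys : F.keys = seen := by
    show F.items.map Prod.fst = seen
    rw [hitems, fnew_fst]
  have hknd : F.keys.Nodup := by rw [hkeys]; exact hnd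
  -- rank of a seen digit is its recorded first index, < L
  have hrank_seen : ∀ p ∈ fnew cs [] 0, (∀ dflt : Int, F.getD p.1 dflt = p.2) ∧ 0 ≤ p.2 ∧ p.2 < L := by
    intro p hp
    have hmem : (p.1, p.2) ∈ F.items := by rw [hitems]; exact hp
    have hb := fnew_snd_bounds cs [] 0 p hp
    exact ⟨PySem.Dict.getD_of_mem_items F hmem hknd, by omega, by omega⟩
  -- rank of an unseen digit is L + 9 - d
  have hrank_unseen : ∀ d : Int, d ∉ seen → ∀ dflt : Int, F.getD d dflt = dflt := by
    intro d hd dflt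
    have hcf : F.contains d = false := by
      by_contra hb
      have : F.contains d = true := by
        revert hb; cases F.contains d <;> simp
      exact hd (hkeys ▸ (PySem.Dict.contains_iff_mem_keys F _).mp this)
    exact PySem.Dict.getD_of_not_contains F dflt hcf
  have hR : PySem.List.pyRange 9 (-1) (-1) = [9,8,7,6,5,4,3,2,1,0] := by decide
  have hremdesc : rem.Pairwise (fun a b => b < a) := by
    rw [hrem]
    exact List.Pairwise.sublist List.filter_sublist (by rw [hR]; decide)
  have hremnd : rem.Nodup := by
    rw [hrem]
    exact List.Sublist.nodup List.filter_sublist (by rw [hR]; decide)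
  have hremmem : ∀ x ∈ rem, x ∉ seen ∧ 0 ≤ x ∧ x ≤ 9 := by
    intro x hx
    rw [hrem, List.mem_filter] at hx
    obtain ⟨hxr, hxs⟩ := hx
    rcases PySem.List.mem_pyRange_neg_one.mp hxr with ⟨h1, h2⟩
    exact ⟨by simpa using hxs, by omega, h2⟩
  -- permutation with range(10)
  have hperm : (seen ++ rem).Perm (PySem.List.pyRange 0 10 1) := by
    apply (List.perm_ext_iff_of_nodup ?_ (PySem.List.nodup_pyRange_one 0 10)).mpr
    · intro x
      rw [List.mem_append, PySem.List.mem_pyRange_one]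
      constructor
      · intro hx
        rcases hx with hx | hx
        · have := hsub x hx; simp [digitVals] at this; omega
        · have := hremmem x hx; omega
      · intro hx
        by_cases hs : x ∈ seen
        · exact Or.inl hs
        · refine Or.inr ?_
          rw [hrem, List.mem_filter]
          exact ⟨PySem.List.mem_pyRange_neg_one.mpr (by omega), by simpa using hs⟩
    · rw [List.nodup_append]
      exact ⟨hnd, hremnd, fun a ha b hb => fun e => (hremmem b hb).1 (e ▸ ha)⟩
  -- strict key-increase along seen ++ rem
  have hpw : (seen ++ rem).Pairwise
      (fun a b => F.getD a (L + 9 - a) < F.getD b (L + 9 - b)) := by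
    rw [List.pairwise_append]
    refine ⟨?_, ?_, ?_⟩
    · -- within seen: first indices strictly increase
      have hfp : (fnew cs [] 0).Pairwise
          (fun p q => F.getD p.1 (L + 9 - p.1) < F.getD q.1 (L + 9 - q.1)) := by
        have := fnew_pairwise cs [] 0
        refine List.Pairwise.imp_of_mem ?_ this
        intro p q hp hq hlt
        rw [(hrank_seen p hp).1, (hrank_seen q hq).1]
        exact hlt
      have : seen = (fnew cs [] 0).map Prod.fst := (fnew_fst cs [] 0).symm
      rw [this, List.pairwise_map]
      exact hfp
    · -- within rem: descending digits, so L+9-d strictly increases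
      refine List.Pairwise.imp_of_mem ?_ hremdesc
      intro a b ha hb hba
      rw [hrank_unseen a (hremmem a ha).1, hrank_unseen b (hremmem b hb).1]
      omega
    · -- seen before rem
      intro a ha b hb
      obtain ⟨p, hp, hpa⟩ : ∃ p ∈ fnew cs [] 0, p.1 = a := by
        have : a ∈ (fnew cs [] 0).map Prod.fst := by rw [fnew_fst]; exact ha
        rcases List.mem_map.mp this with ⟨p, hp, hpa⟩
        exact ⟨p, hp, hpa⟩
      obtain ⟨hget, h0, hL'⟩ := hrank_seen p hp
      rw [← hpa, hget, hrank_unseen b (hremmem b hb).1]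
      have := (hremmem b hb).2.2
      omega
  exact PySem.List.sorted_eq_of_perm_of_pairwise_lt _ _ _ hperm hpw

-- ===== VERDICT (by name: the statement is the Claim_ definition above) =====
theorem genarate_key_spec : Claim_equal_genarate_key := by
  intro key _ hpre
  show genarate_key key = genarate_key_alt key
  have hdig := toChars_digits key hpre
  have e0 : ((([] : List Int)).length : Int) = 0 := rfl
  have h1 := phase1_spec (PySem.Int.toChars key) hdig PySem.Dict.empty []
    List.nodup_nil (by simp) (by simp [PySem.Dict.keys_empty])
  rw [e0] at h1
  obtain ⟨harr, hcount, hitems, hnd, hsub, hfresh⟩ := h1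
  rw [List.nil_append] at harr hcount hnd hsub hfresh
  set cs := PySem.Int.toChars key with hcs
  set seen := dnew cs [] with hseen
  have hempty : (PySem.Dict.empty : PySem.Dict String String).items = [] := rfl
  rw [hempty, List.nil_append] at hitems
  obtain ⟨hle10, hflen⟩ := missing_length seen hnd hsub
  have hsize : (cs.foldl gkStep (PySem.Dict.empty, 0, [])).1.size = seen.length := by
    show (cs.foldl gkStep (PySem.Dict.empty, 0, [])).1.items.length = seen.length
    rw [hitems]
    simp [PySem.List.length_enumerate]
  have hn : (10 - ((cs.foldl gkStep (PySem.Dict.empty, 0, [])).1.size : Int)).toNat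
      = 10 - seen.length := by
    rw [hsize]; omega
  have hfill := fill_spec (10 - seen.length) (cs.foldl gkStep (PySem.Dict.empty, 0, [])).1
    (seen.length : Int) 0 seen (le_refl 0) (by positivity) (by omega)
    (by intro x h9 h9'; omega)
    (by intro i hi h9; exact hfresh i hi h9)
    (by rw [sub_zero]; exact hflen)
  rw [sub_zero] at hfill
  have horder := order_eq cs hnd hsub
  simp only [genarate_key, genarate_key_alt, ← hcs]
  rw [hn, hcount, harr, hfill, hitems, horder]
  rw [PySem.List.enumerate_append]
  simp only [List.map_append, zero_add]
  rfl
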